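-- pv_equiv track=rewrite | github.com/runyournode/Foil-Serve | tests/spreadsheet/test_excel2txt.py | _table_blocks
-- ===== SOURCE A (Python) =====
-- def _table_blocks(md: str) -> list[str]:
--     """Extract pipe-table blocks (consecutive lines containing '|')."""
--     blocks: list[str] = []
--     current: list[str] = []
--     for line in md.splitlines():
--         if "|" in line:
--             current.append(line)
--         elif current:
--             blocks.append("\n".join(current))
--             current = []
--     if current:
--         blocks.append("\n".join(current))
--     return blocks
-- ===== SOURCE B (Python) =====
-- def _table_blocks(md: str) -> list[str]:
--     """Extract pipe-table blocks (consecutive lines containing '|')."""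
--     lines = md.splitlines()
--     n = len(lines)
--     blocks = []
--     i = 0
--     while i < n:
--         if "|" in lines[i]:
--             j = i
--             while j < n and "|" in lines[j]:
--                 j += 1
--             blocks.append("\n".join(lines[i:j]))
--             i = j
--         else:
--             i += 1
--     return blocks
-- ===== Notes on version B (the rewrite author's own statement) =====
-- stated objective: alternative
-- what changed: Replaces A's accumulate-and-flush pending-buffer loop (with a separate end-of-loop flush) by a two-pointer scan over the split line list that finds each maximal run of pipe-containing lines and joins the slice lines[i:j] directly.
import Mathlib
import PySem

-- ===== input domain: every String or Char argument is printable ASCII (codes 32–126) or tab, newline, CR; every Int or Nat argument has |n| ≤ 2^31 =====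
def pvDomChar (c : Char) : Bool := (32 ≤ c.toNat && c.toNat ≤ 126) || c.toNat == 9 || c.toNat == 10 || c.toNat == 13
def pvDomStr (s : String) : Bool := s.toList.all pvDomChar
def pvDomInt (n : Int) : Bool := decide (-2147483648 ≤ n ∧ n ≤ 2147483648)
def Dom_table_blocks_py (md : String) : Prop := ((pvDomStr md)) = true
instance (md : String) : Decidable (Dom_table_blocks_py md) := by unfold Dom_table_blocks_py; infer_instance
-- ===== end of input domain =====

-- B replaces A's accumulate-and-flush buffer with a two-pointer scan that slices out each
-- maximal run of pipe-containing lines directly (objective: alternative, same O(n) cost).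

-- '"|" in line' (shared one-line predicate)
def pvPipe (line : String) : Bool := PySem.Str.isIn "|" line

-- ===== PORT A =====
-- state: (blocks, current); flush at a non-pipe line and once more at the end
def table_blocks_py (md : String) : List String :=
  let r :=
    (PySem.Str.splitlines md).foldl
      (fun (s : List String × List String) line =>
        if pvPipe line then (s.1, s.2 ++ [line])
        else if s.2 ≠ [] then (s.1 ++ [PySem.Str.join "\n" s.2], ([] : List String))
        else s)
      ([], [])
  if r.2 ≠ [] then r.1 ++ [PySem.Str.join "\n" r.2] else r.1

-- ===== PORT B =====
-- inner 'while j < n and "|" in lines[j]: j += 1'  (lines.getD j "" = lines[j], j is in range whenever read)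
def pvScanB (lines : List String) (n : Nat) (j : Nat) : Nat :=
  if j < n ∧ pvPipe (lines.getD j "") then pvScanB lines n (j + 1) else j
termination_by n - j
decreasing_by omega

theorem pvScanB_ge (lines : List String) (n : Nat) (j : Nat) : j ≤ pvScanB lines n j := by
  rw [pvScanB]
  split
  · exact le_trans (Nat.le_succ j) (pvScanB_ge lines n (j + 1))
  · exact le_refl j
termination_by n - j
decreasing_by omega

-- used by pvOuterB's termination: when the run starts, the scan moves strictly right
theorem pvScanB_gt (lines : List String) (n : Nat) (i : Nat)
    (h : i < n) (hp : pvPipe (lines.getD i "") = true) : i < pvScanB lines n i := by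
  rw [pvScanB]
  simp only [h, hp, and_self, if_true]
  exact Nat.lt_of_lt_of_le (Nat.lt_succ_self i) (pvScanB_ge lines n (i + 1))

-- outer 'while i < n', slicing lines[i:j] per run
def pvOuterB (lines : List String) (n : Nat) (i : Nat) : List String :=
  if h : i < n then
    if hp : pvPipe (lines.getD i "") then
      let j := pvScanB lines n i
      PySem.Str.join "\n" (PySem.List.slice lines (some (i : Int)) (some (j : Int))) ::
        pvOuterB lines n j
    else pvOuterB lines n (i + 1)
  else []
termination_by n - i
decreasing_by
  · have := pvScanB_gt lines n i h hp; omega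
  · omega

def table_blocks_py_alt (md : String) : List String :=
  let lines := PySem.Str.splitlines md
  pvOuterB lines lines.length 0

-- ===== PRECONDITION & SPEC =====
def Spec_table_blocks_py (md : String) (out : List String) : Prop := out = table_blocks_py_alt md
instance (md : String) (out : List String) : Decidable (Spec_table_blocks_py md out) := by unfold Spec_table_blocks_py; infer_instance

-- ===== CLAIM (what is proved, stated in full; the proofs are below) =====
def Claim_equal_table_blocks_py : Prop := ∀ (md : String), Dom_table_blocks_py md → Spec_table_blocks_py md (table_blocks_py md)

-- ===== LEMMAS AND PROOFS =====

-- recursive rendering of A's loop (state = pending 'current' buffer)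
def pvArec : List String → List String → List String
  | [], cur => if cur ≠ [] then [PySem.Str.join "\n" cur] else []
  | l :: ls, cur =>
    if pvPipe l then pvArec ls (cur ++ [l])
    else if cur ≠ [] then PySem.Str.join "\n" cur :: pvArec ls [] else pvArec ls []

-- structural group-by-runs specification shared by both directions
def pvBSpec : List String → List String
  | [] => []
  | l :: ls =>
    if pvPipe l then
      PySem.Str.join "\n" (l :: ls.takeWhile pvPipe) :: pvBSpec (ls.dropWhile pvPipe)
    else pvBSpec ls
termination_by ls => ls.length
decreasing_by
  · exact Nat.lt_succ_of_le (List.length_dropWhile_le _ _)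
  · exact Nat.lt_succ_self _

theorem pvFoldA (lines : List String) : ∀ (blocks cur : List String),
    (let r := lines.foldl
        (fun (s : List String × List String) line =>
          if pvPipe line then (s.1, s.2 ++ [line])
          else if s.2 ≠ [] then (s.1 ++ [PySem.Str.join "\n" s.2], ([] : List String))
          else s)
        (blocks, cur)
     if r.2 ≠ [] then r.1 ++ [PySem.Str.join "\n" r.2] else r.1)
      = blocks ++ pvArec lines cur := by
  induction lines with
  | nil =>
    intro blocks cur
    simp only [List.foldl_nil, pvArec]
    split_ifs <;> simp
  | cons l ls ih =>
    intro blocks cur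
    simp only [List.foldl_cons, pvArec]
    by_cases hp : pvPipe l
    · simp only [hp, if_true]
      exact ih blocks (cur ++ [l])
    · simp only [hp, Bool.false_eq_true, if_false]
      by_cases hc : cur = []
      · simp only [hc, ne_eq, not_true_eq_false, if_false]
        exact ih blocks []
      · simp only [hc, ne_eq, not_false_eq_true, if_true]
        rw [ih (blocks ++ [PySem.Str.join "\n" cur]) []]
        simp

theorem pvJoint (lines : List String) :
    (∀ cur, cur ≠ [] →
      pvArec lines cur
        = PySem.Str.join "\n" (cur ++ lines.takeWhile pvPipe) :: pvBSpec (lines.dropWhile pvPipe))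
    ∧ pvArec lines [] = pvBSpec lines := by
  induction lines with
  | nil =>
    exact ⟨fun cur hc => by simp [pvArec, pvBSpec, hc], by simp [pvArec, pvBSpec]⟩
  | cons l ls ih =>
    have key : ∀ cur, cur ≠ [] →
        pvArec (l :: ls) cur
          = PySem.Str.join "\n" (cur ++ (l :: ls).takeWhile pvPipe)
              :: pvBSpec ((l :: ls).dropWhile pvPipe) := by
      intro cur hc
      by_cases hp : pvPipe l
      · simp only [pvArec, hp, if_true, List.takeWhile_cons_of_pos hp,
          List.dropWhile_cons_of_pos hp]
        rw [ih.1 (cur ++ [l]) (by simp)]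
        simp
      · rw [List.takeWhile_cons_of_neg hp, List.dropWhile_cons_of_neg hp]
        simp only [pvArec, hp, Bool.false_eq_true, if_false, hc, ne_eq,
          not_false_eq_true, if_true]
        rw [ih.2]
        simp only [pvBSpec, hp, Bool.false_eq_true, if_false, List.append_nil]
    refine ⟨key, ?_⟩
    by_cases hp : pvPipe l
    · simp only [pvArec, hp, if_true, List.nil_append]
      rw [ih.1 [l] (by simp)]
      simp [pvBSpec, hp]
    · simp only [pvArec, hp, Bool.false_eq_true, if_false, ne_eq,
        not_true_eq_false, if_false]
      rw [ih.2]
      simp [pvBSpec, hp]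

theorem pvScanB_char (lines : List String) : ∀ j : Nat,
    pvScanB lines lines.length j = j + ((lines.drop j).takeWhile pvPipe).length := by
  intro j
  rw [pvScanB]
  by_cases hj : j < lines.length
  · have hdrop : lines[j] :: lines.drop (j + 1) = lines.drop j := List.getElem_cons_drop hj
    have hget : lines.getD j "" = lines[j] := List.getD_eq_getElem lines "" hj
    by_cases hp : pvPipe lines[j]
    · simp only [hj, hget, hp, and_self, if_true]
      rw [pvScanB_char lines (j + 1), ← hdrop, List.takeWhile_cons_of_pos hp]
      simp only [List.length_cons]
      omega
    · have hcond : ¬(j < lines.length ∧ pvPipe (lines.getD j "") = true) := by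
        intro hcontra; rw [hget] at hcontra; exact hp hcontra.2
      rw [if_neg hcond, ← hdrop, List.takeWhile_cons_of_neg hp]
      simp
  · have hcond : ¬(j < lines.length ∧ pvPipe (lines.getD j "") = true) := by
      simp [hj]
    rw [if_neg hcond, List.drop_eq_nil_of_le (by omega : lines.length ≤ j)]
    simp
termination_by j => lines.length - j
decreasing_by omega

theorem pvOuterB_eq (lines : List String) : ∀ i : Nat,
    pvOuterB lines lines.length i = pvBSpec (lines.drop i) := by
  intro i
  rw [pvOuterB]
  by_cases hi : i < lines.length
  · have hdrop : lines[i] :: lines.drop (i + 1) = lines.drop i := List.getElem_cons_drop hi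
    have hget : lines.getD i "" = lines[i] := List.getD_eq_getElem lines "" hi
    by_cases hp : pvPipe lines[i]
    · have hj1 : pvScanB lines lines.length i = pvScanB lines lines.length (i + 1) := by
        rw [pvScanB]; simp [hi, hp]
      have hj : pvScanB lines lines.length i
          = i + 1 + ((lines.drop (i + 1)).takeWhile pvPipe).length := by
        rw [hj1, pvScanB_char]
      set t := (lines.drop (i + 1)).takeWhile pvPipe with ht
      have hslice : PySem.List.slice lines (some (i : Int))
            (some ((pvScanB lines lines.length i : Nat) : Int)) = lines[i] :: t := by
        rw [PySem.List.slice_natCast, hj]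
        have : i + 1 + t.length - i = t.length + 1 := by omega
        rw [this, ← hdrop]
        obtain ⟨r, hr⟩ := (lines.drop (i + 1)).takeWhile_prefix pvPipe
        rw [← ht] at hr
        conv_lhs => rw [← hr]
        simp only [List.take_succ_cons]
        rw [← List.take_left (l₁ := t) (l₂ := r)]
        simp
      have hrest : lines.drop (pvScanB lines lines.length i)
          = (lines.drop (i + 1)).dropWhile pvPipe := by
        rw [hj, ← List.drop_drop (i := t.length) (j := i + 1) (l := lines)]
        conv_lhs => rw [show lines.drop (i + 1) = t ++ (lines.drop (i + 1)).dropWhile pvPipe from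
          (List.takeWhile_append_dropWhile (p := pvPipe) (l := lines.drop (i + 1))).symm]
        rw [List.drop_left]
      simp only [hi, dif_pos, hget, hp, dif_pos]
      rw [hslice, pvOuterB_eq lines (pvScanB lines lines.length i), hrest]
      conv_rhs => rw [← hdrop]
      rw [pvBSpec, if_pos hp]
    · simp only [hi, dif_pos, hget, hp, Bool.false_eq_true, dif_neg, not_false_eq_true]
      rw [pvOuterB_eq lines (i + 1)]
      conv_rhs => rw [← hdrop]
      rw [pvBSpec, if_neg hp]
  · simp only [hi, dif_neg, not_false_eq_true,
      List.drop_eq_nil_of_le (by omega : lines.length ≤ i), pvBSpec]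
termination_by i => lines.length - i
decreasing_by
  · have := pvScanB_gt lines lines.length i hi (by rwa [hget]); omega
  · omega

-- ===== VERDICT (by name: the statement is the Claim_ definition above) =====
theorem table_blocks_py_spec : Claim_equal_table_blocks_py := by
  intro md _
  unfold Spec_table_blocks_py table_blocks_py table_blocks_py_alt
  rw [pvFoldA, pvOuterB_eq, List.drop_zero, List.nil_append, (pvJoint _).2]
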